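-- pv_equiv track=rewrite | github.com/mrefaat87/vLLM-Inference-Lab | stage2_exp2_prefill_vs_decode.py | generate_prompt_of_length
-- ===== SOURCE A (Python) =====
-- def generate_prompt_of_length(target_tokens: int) -> str:
--     """Generate a prompt that's approximately target_tokens long.
--
--     Why word-based estimation: ~1.3 tokens per word for English in most
--     tokenizers. We overshoot slightly and let the model handle it.
--     """
--     # Base instruction is short — the padding is what controls length
--     base = "Summarize the following text in exactly 50 words:\n\n"
--     # ~1.3 tokens per word, so we need target_tokens / 1.3 words
--     words_needed = int((target_tokens - 20) / 1.3)  # 20 tokens for the base instruction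
--
--     # Generate filler text that's coherent enough to not confuse the model
--     filler_sentences = [
--         "The rapid advancement of technology has transformed every aspect of modern life.",
--         "From artificial intelligence to quantum computing, new innovations emerge daily.",
--         "Cloud computing enables organizations to scale their infrastructure dynamically.",
--         "Machine learning models require significant computational resources for training.",
--         "Distributed systems must handle network partitions and maintain consistency.",
--         "Load balancers distribute incoming traffic across multiple server instances.",
--         "Containerization with Docker simplified application deployment and scaling.",
--         "Kubernetes orchestrates container workloads across clusters of machines.",
--         "Monitoring and observability are critical for maintaining system reliability.",
--         "Auto scaling adjusts capacity based on real-time demand metrics.",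
--         "Database sharding improves query performance by distributing data horizontally.",
--         "Content delivery networks cache static assets closer to end users.",
--         "Microservices architecture decomposes monolithic applications into smaller services.",
--         "API gateways provide a unified entry point for client applications.",
--         "Message queues decouple producers and consumers for asynchronous processing.",
--         "Circuit breakers prevent cascading failures in distributed systems.",
--         "Service mesh technologies like Istio manage inter-service communication.",
--         "Infrastructure as code enables reproducible and version-controlled deployments.",
--         "Continuous integration pipelines automate building and testing of software.",
--         "Blue-green deployments minimize downtime during application updates.",
--     ]
--
--     words = []
--     while len(words) < words_needed:
--         for sentence in filler_sentences:
--             words.extend(sentence.split())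
--             if len(words) >= words_needed:
--                 break
--
--     padded_text = " ".join(words[:words_needed])
--     return base + padded_text
-- ===== SOURCE B (Python) =====
-- _FILLER_WORDS = [
--     'The', 'rapid', 'advancement', 'of', 'technology', 'has',
--     'transformed', 'every', 'aspect', 'of', 'modern', 'life.',
--     'From', 'artificial', 'intelligence', 'to', 'quantum', 'computing,',
--     'new', 'innovations', 'emerge', 'daily.', 'Cloud', 'computing',
--     'enables', 'organizations', 'to', 'scale', 'their', 'infrastructure',
--     'dynamically.', 'Machine', 'learning', 'models', 'require', 'significant',
--     'computational', 'resources', 'for', 'training.', 'Distributed', 'systems',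
--     'must', 'handle', 'network', 'partitions', 'and', 'maintain',
--     'consistency.', 'Load', 'balancers', 'distribute', 'incoming', 'traffic',
--     'across', 'multiple', 'server', 'instances.', 'Containerization', 'with',
--     'Docker', 'simplified', 'application', 'deployment', 'and', 'scaling.',
--     'Kubernetes', 'orchestrates', 'container', 'workloads', 'across', 'clusters',
--     'of', 'machines.', 'Monitoring', 'and', 'observability', 'are',
--     'critical', 'for', 'maintaining', 'system', 'reliability.', 'Auto',
--     'scaling', 'adjusts', 'capacity', 'based', 'on', 'real-time',
--     'demand', 'metrics.', 'Database', 'sharding', 'improves', 'query',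
--     'performance', 'by', 'distributing', 'data', 'horizontally.', 'Content',
--     'delivery', 'networks', 'cache', 'static', 'assets', 'closer',
--     'to', 'end', 'users.', 'Microservices', 'architecture', 'decomposes',
--     'monolithic', 'applications', 'into', 'smaller', 'services.', 'API',
--     'gateways', 'provide', 'a', 'unified', 'entry', 'point',
--     'for', 'client', 'applications.', 'Message', 'queues', 'decouple',
--     'producers', 'and', 'consumers', 'for', 'asynchronous', 'processing.',
--     'Circuit', 'breakers', 'prevent', 'cascading', 'failures', 'in',
--     'distributed', 'systems.', 'Service', 'mesh', 'technologies', 'like',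
--     'Istio', 'manage', 'inter-service', 'communication.', 'Infrastructure', 'as',
--     'code', 'enables', 'reproducible', 'and', 'version-controlled', 'deployments.',
--     'Continuous', 'integration', 'pipelines', 'automate', 'building', 'and',
--     'testing', 'of', 'software.', 'Blue-green', 'deployments', 'minimize',
--     'downtime', 'during', 'application', 'updates.',
-- ]
--
--
-- def generate_prompt_of_length(target_tokens: int) -> str:
--     """Generate a prompt that's approximately target_tokens long.
--
--     Pads with a precomputed flat word list: whole repetitions plus a
--     leading slice, instead of looping over sentences until long enough.
--     """
--     base = "Summarize the following text in exactly 50 words:\n\n"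
--     words_needed = int((target_tokens - 20) / 1.3)  # 20 tokens for the base instruction
--     if words_needed <= 0:
--         return base
--     full, rem = divmod(words_needed, len(_FILLER_WORDS))
--     return base + " ".join(_FILLER_WORDS * full + _FILLER_WORDS[:rem])
-- ===== Notes on version B (the rewrite author's own statement) =====
-- stated objective: alternative
-- what changed: Replaces A's sentence-by-sentence accumulation loop (while/for with mid-pass break and a final slice) with a precomputed flat word-list constant and arithmetic: divmod(words_needed, len(words)) gives whole list repetitions plus a leading slice.
import Mathlib
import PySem

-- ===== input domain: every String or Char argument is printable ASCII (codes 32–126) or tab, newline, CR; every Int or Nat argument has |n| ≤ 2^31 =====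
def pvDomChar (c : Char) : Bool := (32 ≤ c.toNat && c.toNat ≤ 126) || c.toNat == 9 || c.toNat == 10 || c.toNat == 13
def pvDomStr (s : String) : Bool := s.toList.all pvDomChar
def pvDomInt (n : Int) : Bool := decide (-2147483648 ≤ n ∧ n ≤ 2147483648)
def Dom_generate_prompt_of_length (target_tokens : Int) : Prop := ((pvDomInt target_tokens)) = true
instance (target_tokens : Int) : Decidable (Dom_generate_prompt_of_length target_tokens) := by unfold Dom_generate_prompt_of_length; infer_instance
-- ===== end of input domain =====

-- B pads with a precomputed flat word-list constant via divmod (whole repetitions of the list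
-- plus a leading slice), replacing A's sentence-by-sentence accumulation loop with mid-pass break.

-- Shared helper (used verbatim by BOTH ports): exact emulation of the Python float expression
-- int((target_tokens - 20) / 1.3).  1.3 as an IEEE-754 double is pvD13 * 2^-52; the quotient is
-- rounded to 53 significant bits with round-half-to-even, then truncated toward zero, exactly as
-- CPython's float division + int() behave on this domain (no overflow/subnormals can occur).
def pvD13 : Nat := 5854679515581645

def pvFdiv13 (a : Nat) : Nat :=
  let n := a <<< 52
  let k := n.size - 53
  let e : Int := if pvD13 <<< k ≤ n then (k : Int) else (k : Int) - 1
  let N := if e ≤ 52 then n <<< (52 - e).toNat else n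
  let Dd := if e ≤ 52 then pvD13 else pvD13 <<< (e - 52).toNat
  let q := N / Dd
  let r := N % Dd
  let q2 := if Dd < 2 * r ∨ (2 * r = Dd ∧ q % 2 = 1) then q + 1 else q
  let q3 := if q2 = 2 ^ 53 then 2 ^ 52 else q2
  let e3 : Int := if q2 = 2 ^ 53 then e + 1 else e
  if 52 ≤ e3 then q3 <<< (e3 - 52).toNat else q3 >>> (52 - e3).toNat

def wordsNeeded (t : Int) : Int :=
  let x := t - 20
  if x = 0 then 0
  else if 0 < x then (pvFdiv13 x.toNat : Int)
  else -(pvFdiv13 (-x).toNat : Int)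

def fillerSentences : List String := [
  "The rapid advancement of technology has transformed every aspect of modern life.",
  "From artificial intelligence to quantum computing, new innovations emerge daily.",
  "Cloud computing enables organizations to scale their infrastructure dynamically.",
  "Machine learning models require significant computational resources for training.",
  "Distributed systems must handle network partitions and maintain consistency.",
  "Load balancers distribute incoming traffic across multiple server instances.",
  "Containerization with Docker simplified application deployment and scaling.",
  "Kubernetes orchestrates container workloads across clusters of machines.",
  "Monitoring and observability are critical for maintaining system reliability.",
  "Auto scaling adjusts capacity based on real-time demand metrics.",
  "Database sharding improves query performance by distributing data horizontally.",
  "Content delivery networks cache static assets closer to end users.",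
  "Microservices architecture decomposes monolithic applications into smaller services.",
  "API gateways provide a unified entry point for client applications.",
  "Message queues decouple producers and consumers for asynchronous processing.",
  "Circuit breakers prevent cascading failures in distributed systems.",
  "Service mesh technologies like Istio manage inter-service communication.",
  "Infrastructure as code enables reproducible and version-controlled deployments.",
  "Continuous integration pipelines automate building and testing of software.",
  "Blue-green deployments minimize downtime during application updates."
]

-- ===== PORT A =====
-- (the next few lemmas establish that a pass over the sentences adds at least one word;
--  whileA's termination proof cites innerA_filler_gt by name)
theorem go_ne_nil : ∀ (cs cur : List Char) (acc : List (List Char)),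
    (acc ≠ [] ∨ cur ≠ [] ∨ ∃ c ∈ cs, PySem.Chars.isspace c = false) →
    PySem.Chars.split₀.go cs cur acc ≠ []
  | [], cur, acc, h => by
    rw [PySem.Chars.split₀.go]
    split
    · rcases h with h | h | ⟨c, hc, _⟩
      · simpa using h
      · simp_all
      · cases hc
    · simp
  | c :: rest, cur, acc, h => by
    rw [PySem.Chars.split₀.go]
    split
    · split
      · apply go_ne_nil rest [] acc
        rcases h with h | h | ⟨c', hmem, hsp⟩
        · exact Or.inl h
        · simp_all
        · rcases List.mem_cons.mp hmem with rfl | hm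
          · simp_all
          · exact Or.inr (Or.inr ⟨c', hm, hsp⟩)
      · exact go_ne_nil rest [] (cur.reverse :: acc) (Or.inl (by simp))
    · exact go_ne_nil rest (c :: cur) acc (Or.inr (Or.inl (by simp)))

theorem split₀_ne_nil (s : String) (h : ∃ c ∈ s.toList, PySem.Chars.isspace c = false) :
    PySem.Str.split₀ s ≠ [] := by
  unfold PySem.Str.split₀ PySem.Chars.split₀
  simp only [ne_eq, List.map_eq_nil_iff]
  exact go_ne_nil _ [] [] (Or.inr (Or.inr h))

theorem s0_len_pos :
    0 < (PySem.Str.split₀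
      "The rapid advancement of technology has transformed every aspect of modern life.").length := by
  apply List.length_pos_of_ne_nil
  exact split₀_ne_nil _ ⟨'T', by decide, by decide⟩

-- the inner 'for sentence in filler_sentences: words.extend(sentence.split()); if len(words) >= n: break'
def innerA (n : Int) : List String → List String → List String
  | [], words => words
  | s :: rest, words =>
    let w' := words ++ PySem.Str.split₀ s
    if n ≤ (w'.length : Int) then w' else innerA n rest w'

theorem innerA_length_le (n : Int) : ∀ (ss words : List String),
    words.length ≤ (innerA n ss words).length
  | [], _ => le_refl _
  | s :: rest, words => by
    simp only [innerA]
    split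
    · simp
    · exact le_trans (by simp) (innerA_length_le n rest (words ++ PySem.Str.split₀ s))

theorem innerA_filler_gt (n : Int) (words : List String) :
    words.length < (innerA n fillerSentences words).length := by
  have h : fillerSentences =
      "The rapid advancement of technology has transformed every aspect of modern life." ::
        fillerSentences.tail := rfl
  rw [h]
  simp only [innerA]
  have hp := s0_len_pos
  split
  · simp; omega
  · calc words.length
        < (words ++ PySem.Str.split₀
            "The rapid advancement of technology has transformed every aspect of modern life.").length := by
          simp; omega
      _ ≤ _ := innerA_length_le n _ _

-- the outer 'while len(words) < words_needed:' loop
def whileA (n : Int) (words : List String) : List String :=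
  if (words.length : Int) < n then whileA n (innerA n fillerSentences words) else words
termination_by (n - words.length).toNat
decreasing_by
  have h := innerA_filler_gt n words
  omega

def generate_prompt_of_length (target_tokens : Int) : String :=
  let base := "Summarize the following text in exactly 50 words:\n\n"
  let words_needed := wordsNeeded target_tokens
  let words := whileA words_needed []
  let padded_text := PySem.Str.join " " (PySem.List.slice words none (some words_needed))
  base ++ padded_text

-- ===== PORT B =====
-- the module-level flat word constant _FILLER_WORDS of Source B
def fillerWords : List String := [
  "The", "rapid", "advancement", "of", "technology",
  "has", "transformed", "every", "aspect", "of",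
  "modern", "life.", "From", "artificial", "intelligence",
  "to", "quantum", "computing,", "new", "innovations",
  "emerge", "daily.", "Cloud", "computing", "enables",
  "organizations", "to", "scale", "their", "infrastructure",
  "dynamically.", "Machine", "learning", "models", "require",
  "significant", "computational", "resources", "for", "training.",
  "Distributed", "systems", "must", "handle", "network",
  "partitions", "and", "maintain", "consistency.", "Load",
  "balancers", "distribute", "incoming", "traffic", "across",
  "multiple", "server", "instances.", "Containerization", "with",
  "Docker", "simplified", "application", "deployment", "and",
  "scaling.", "Kubernetes", "orchestrates", "container", "workloads",
  "across", "clusters", "of", "machines.", "Monitoring",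
  "and", "observability", "are", "critical", "for",
  "maintaining", "system", "reliability.", "Auto", "scaling",
  "adjusts", "capacity", "based", "on", "real-time",
  "demand", "metrics.", "Database", "sharding", "improves",
  "query", "performance", "by", "distributing", "data",
  "horizontally.", "Content", "delivery", "networks", "cache",
  "static", "assets", "closer", "to", "end",
  "users.", "Microservices", "architecture", "decomposes", "monolithic",
  "applications", "into", "smaller", "services.", "API",
  "gateways", "provide", "a", "unified", "entry",
  "point", "for", "client", "applications.", "Message",
  "queues", "decouple", "producers", "and", "consumers",
  "for", "asynchronous", "processing.", "Circuit", "breakers",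
  "prevent", "cascading", "failures", "in", "distributed",
  "systems.", "Service", "mesh", "technologies", "like",
  "Istio", "manage", "inter-service", "communication.", "Infrastructure",
  "as", "code", "enables", "reproducible", "and",
  "version-controlled", "deployments.", "Continuous", "integration", "pipelines",
  "automate", "building", "and", "testing", "of",
  "software.", "Blue-green", "deployments", "minimize", "downtime",
  "during", "application", "updates."]

def generate_prompt_of_length_alt (target_tokens : Int) : String :=
  let base := "Summarize the following text in exactly 50 words:\n\n"
  let words_needed := wordsNeeded target_tokens
  if words_needed ≤ 0 then base
  else
    -- full, rem = divmod(words_needed, len(_FILLER_WORDS)); list * full is replicate+flatten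
    let full := PySem.Int.floordiv words_needed (fillerWords.length : Int)
    let rem := PySem.Int.mod words_needed (fillerWords.length : Int)
    base ++ PySem.Str.join " "
      ((List.replicate full.toNat fillerWords).flatten ++ PySem.List.slice fillerWords none (some rem))

-- ===== PRECONDITION & SPEC =====
def Spec_generate_prompt_of_length (target_tokens : Int) (out : String) : Prop := out = generate_prompt_of_length_alt target_tokens
instance (target_tokens : Int) (out : String) : Decidable (Spec_generate_prompt_of_length target_tokens out) := by unfold Spec_generate_prompt_of_length; infer_instance

-- ===== CLAIM (what is proved, stated in full; the proofs are below) =====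
def Claim_equal_generate_prompt_of_length : Prop := ∀ (target_tokens : Int), Dom_generate_prompt_of_length target_tokens → Spec_generate_prompt_of_length target_tokens (generate_prompt_of_length target_tokens)

-- ===== LEMMAS AND PROOFS =====

def allW : List String := fillerSentences.flatMap (fun s => PySem.Str.split₀ s)

theorem flatMap_eq_allW : fillerSentences.flatMap (fun s => PySem.Str.split₀ s) = allW := rfl

-- the flat word constant of B is exactly A's sentences split and concatenated
set_option maxRecDepth 40000 in
theorem allW_eq : allW = fillerWords := by decide

set_option maxRecDepth 40000 in
theorem allW_pos : 0 < allW.length := by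
  rw [allW_eq]; decide

-- k full passes of an arbitrary word block A, as laid down by A's outer loop
def cyc (A : List String) : Nat → List String
  | 0 => []
  | k + 1 => cyc A k ++ A

theorem cyc_length (A : List String) (k : Nat) : (cyc A k).length = k * A.length := by
  induction k with
  | zero => simp [cyc]
  | succ k ih => simp [cyc, ih]; ring

theorem cyc_succ (A : List String) (k : Nat) : cyc A (k + 1) = cyc A k ++ A := by simp [cyc]

theorem cyc_succ' (A : List String) (k : Nat) : A ++ cyc A k = cyc A (k + 1) := by
  induction k with
  | zero => simp [cyc]
  | succ k ih => rw [cyc_succ A (k + 1), cyc_succ A k, ← List.append_assoc, ih, cyc_succ A k]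

theorem innerA_prefix (n : Int) : ∀ (ss words : List String),
    innerA n ss words <+: words ++ ss.flatMap (fun s => PySem.Str.split₀ s)
  | [], words => by simp [innerA]
  | s :: rest, words => by
    simp only [innerA, List.flatMap_cons]
    split
    · exact ⟨rest.flatMap (fun s => PySem.Str.split₀ s), by simp⟩
    · have := innerA_prefix n rest (words ++ PySem.Str.split₀ s)
      simpa using this

theorem innerA_reach (n : Int) : ∀ (ss words : List String),
    n ≤ ((innerA n ss words).length : Int) ∨
      innerA n ss words = words ++ ss.flatMap (fun s => PySem.Str.split₀ s)
  | [], words => Or.inr (by simp [innerA])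
  | s :: rest, words => by
    simp only [innerA, List.flatMap_cons]
    split
    · exact Or.inl (by assumption)
    · rcases innerA_reach n rest (words ++ PySem.Str.split₀ s) with h | h
      · exact Or.inl h
      · exact Or.inr (by simpa using h)

theorem whileA_spec (n : Int) (hn : 0 < n) (A : List String) (hApos : 0 < A.length)
    (hA : fillerSentences.flatMap (fun s => PySem.Str.split₀ s) = A) (k : Nat) :
    ∃ k', whileA n (cyc A k) <+: cyc A k' ∧ n ≤ ((whileA n (cyc A k)).length : Int) := by
  by_cases h : ((cyc A k).length : Int) < n
  · rcases innerA_reach n fillerSentences (cyc A k) with hr | hr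
    · refine ⟨k + 1, ?_, ?_⟩
      · rw [whileA, if_pos h, whileA, if_neg (by omega)]
        have hp := innerA_prefix n fillerSentences (cyc A k)
        rw [hA] at hp
        rw [cyc_succ A k]
        exact hp
      · rw [whileA, if_pos h, whileA, if_neg (by omega)]
        exact hr
    · have hs : innerA n fillerSentences (cyc A k) = cyc A (k + 1) := by
        rw [hr, hA, cyc_succ A k]
      rw [whileA, if_pos h, hs]
      exact whileA_spec n hn A hApos hA (k + 1)
  · rw [whileA, if_neg h]
    exact ⟨k, List.prefix_refl _, by omega⟩
termination_by ((n - (cyc A k).length).toNat)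
decreasing_by
  have h1 := cyc_length A k
  have h2 := cyc_length A (k + 1)
  have h4 : (k + 1) * A.length = k * A.length + A.length := by ring
  omega

theorem cyc_getElem? (A : List String) (k i : Nat) (h : i < k * A.length) :
    (cyc A k)[i]? = A[i % A.length]? := by
  induction k generalizing i with
  | zero => omega
  | succ k ih =>
    have h4 : (k + 1) * A.length = k * A.length + A.length := by ring
    rw [show cyc A (k + 1) = A ++ cyc A k from (cyc_succ' A k).symm]
    by_cases hi : i < A.length
    · rw [List.getElem?_append_left hi, Nat.mod_eq_of_lt hi]
    · have hge : A.length ≤ i := Nat.le_of_not_lt hi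
      rw [List.getElem?_append_right hge,
        ih (i - A.length) (by omega), Nat.mod_eq_sub_mod hge]

-- Python's list repetition A * k lays down the same list as k passes of A's loop
theorem flatten_replicate (A : List String) : ∀ (k : Nat), (List.replicate k A).flatten = cyc A k
  | 0 => rfl
  | k + 1 => by
    rw [List.replicate_succ, List.flatten_cons, flatten_replicate A k, cyc_succ']

-- the first N words of k' full passes are q whole passes plus a leading slice, N = q*m + r
theorem take_cyc (A : List String) (hW : 0 < A.length) (N k' : Nat) (h : N ≤ k' * A.length) :
    (cyc A k').take N = cyc A (N / A.length) ++ A.take (N % A.length) := by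
  have hdm := Nat.div_add_mod N A.length
  have hrlt : N % A.length < A.length := Nat.mod_lt _ hW
  have hcomm : A.length * (N / A.length) = N / A.length * A.length := Nat.mul_comm _ _
  apply List.ext_getElem?
  intro i
  by_cases hi : i < N
  · rw [List.getElem?_take_of_lt hi, cyc_getElem? A k' i (by omega)]
    by_cases h2 : i < (N / A.length) * A.length
    · rw [List.getElem?_append_left (by rw [cyc_length]; exact h2),
        cyc_getElem? A _ i h2]
    · have hq : (N / A.length) * A.length ≤ i := Nat.le_of_not_lt h2
      rw [List.getElem?_append_right (by rw [cyc_length]; exact hq), cyc_length]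
      have hr : i - N / A.length * A.length < N % A.length := by omega
      rw [List.getElem?_take_of_lt hr]
      have hd : i % A.length = i - N / A.length * A.length := by
        obtain ⟨d, hdl, rfl⟩ : ∃ d, d < N % A.length ∧ i = d + N / A.length * A.length :=
          ⟨i - N / A.length * A.length, hr, by omega⟩
        rw [Nat.add_mul_mod_self_right, Nat.mod_eq_of_lt (by omega)]
        omega
      rw [hd]
  · have h1 : (cyc A (N / A.length) ++ A.take (N % A.length)).length = N := by
      simp [cyc_length]
      omega
    rw [List.getElem?_eq_none (by simp [cyc_length]; omega),
      List.getElem?_eq_none (by rw [h1]; omega)]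

theorem main_lists (n : Int) (hn : 0 < n) :
    PySem.List.slice (whileA n []) none (some n)
      = (List.replicate (PySem.Int.floordiv n (allW.length : Int)).toNat allW).flatten
        ++ PySem.List.slice allW none (some (PySem.Int.mod n (allW.length : Int))) := by
  obtain ⟨k', hpre, hlen⟩ := whileA_spec n hn allW allW_pos flatMap_eq_allW 0
  obtain ⟨t0, ht⟩ := hpre
  have h0 : whileA n (cyc allW 0) = whileA n [] := rfl
  rw [h0] at ht hlen
  have hN : n.toNat ≤ k' * allW.length := by
    have hc := cyc_length allW k'
    have hl : (whileA n []).length ≤ (cyc allW k').length := by rw [← ht]; simp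
    omega
  have hTake : (whileA n []).take n.toNat = (cyc allW k').take n.toNat := by
    rw [← ht, List.take_append_of_le_length (by omega)]
  have hc1 : PySem.Int.floordiv n (allW.length : Int) = ((n.toNat / allW.length : Nat) : Int) := by
    rw [show n = ((n.toNat : Nat) : Int) from by omega]
    exact_mod_cast PySem.Int.floordiv_natCast n.toNat allW.length
  have hc2 : PySem.Int.mod n (allW.length : Int) = ((n.toNat % allW.length : Nat) : Int) := by
    rw [show n = ((n.toNat : Nat) : Int) from by omega]
    exact_mod_cast PySem.Int.mod_natCast n.toNat allW.length
  rw [PySem.List.slice_to _ (le_of_lt hn), hTake, take_cyc allW allW_pos n.toNat k' hN,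
    hc1, hc2, PySem.List.slice_to _ (Int.natCast_nonneg _), flatten_replicate,
    Int.toNat_natCast, Int.toNat_natCast]

-- ===== VERDICT (by name: the statement is the Claim_ definition above) =====
theorem generate_prompt_of_length_spec : Claim_equal_generate_prompt_of_length := by
  intro t _
  unfold Spec_generate_prompt_of_length
  simp only [generate_prompt_of_length, generate_prompt_of_length_alt, ← allW_eq]
  by_cases hn : wordsNeeded t ≤ 0
  · rw [if_pos hn]
    have h1 : whileA (wordsNeeded t) [] = [] := by
      rw [whileA, if_neg (by simpa using hn)]
    rw [h1]
    simp [PySem.List.slice, PySem.Str.join]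
  · rw [if_neg hn]
    rw [main_lists (wordsNeeded t) (by omega)]
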